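-- pv_equiv track=rewrite | github.com/awi2d/FS_autonomous_pyutil | util.py | mes_to_time_range
-- ===== SOURCE A (Python) =====
-- def mes_to_time_range(mes_time, mes_value, start=None, stop=None):
--     if start is not None:
--         for i in range(len(mes_time)):
--             if mes_time[i] > start:
--                 mes_time = mes_time[i:]
--                 mes_value = mes_value[i:]
--                 break
--     if stop is not None:
--         for i in range(len(mes_time)-1, 0, -1):
--             if mes_time[i] < stop:
--                 mes_time = mes_time[:i]
--                 mes_value = mes_value[:i]
--                 break
--     return mes_time, mes_value
-- ===== SOURCE B (Python) =====
-- def mes_to_time_range(mes_time, mes_value, start=None, stop=None):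
--     # Compute the cut indices in two forward passes over mes_time, then slice
--     # each list exactly once (no intermediate copies, no reslicing inside loops).
--     s = 0
--     if start is not None:
--         for i, t in enumerate(mes_time):
--             if t > start:
--                 s = i
--                 break
--     e = None
--     if stop is not None:
--         for i in range(s + 1, len(mes_time)):
--             if mes_time[i] < stop:
--                 e = i
--     return mes_time[s:e], mes_value[s:e]
-- ===== Notes on version B (the rewrite author's own statement) =====
-- stated objective: alternative
-- what changed: B computes both cut indices over mes_time up front - the first index exceeding start, and the last index below stop found by a FORWARD scan over the tail after the start index instead of A's backward break-loop - and slices each list exactly once, where A's break-loops reassign and reslice both lists mid-iteration.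
import Mathlib
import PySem

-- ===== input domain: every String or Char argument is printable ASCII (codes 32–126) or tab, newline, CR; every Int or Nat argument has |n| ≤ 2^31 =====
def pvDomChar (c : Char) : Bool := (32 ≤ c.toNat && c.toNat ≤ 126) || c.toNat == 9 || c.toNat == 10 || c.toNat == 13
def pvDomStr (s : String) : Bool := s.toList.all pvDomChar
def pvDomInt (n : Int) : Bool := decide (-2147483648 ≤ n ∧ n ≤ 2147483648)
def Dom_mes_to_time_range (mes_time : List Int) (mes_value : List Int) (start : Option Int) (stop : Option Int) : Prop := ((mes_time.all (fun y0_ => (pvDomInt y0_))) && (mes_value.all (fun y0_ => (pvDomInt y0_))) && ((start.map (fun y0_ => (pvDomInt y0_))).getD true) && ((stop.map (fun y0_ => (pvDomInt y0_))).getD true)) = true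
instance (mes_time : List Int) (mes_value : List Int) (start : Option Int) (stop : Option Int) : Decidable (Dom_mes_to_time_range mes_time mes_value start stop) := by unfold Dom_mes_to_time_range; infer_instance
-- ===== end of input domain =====

-- B computes both cut indices by two forward passes (first index above start; last
-- index below stop, found by a forward scan instead of A's backward one) and slices
-- each list exactly once, instead of A's break-loops that reslice both lists in place.

-- ===== PORT A =====
-- for i in range(len(mes_time)): if mes_time[i] > start: slice both from i; break
-- (mes_time[i:] with i ≥ 0 is List.drop i — exact for nonnegative in-range indices)
def aStartLoop (t v : List Int) (st : Int) (i : Nat) : List Int × List Int :=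
  if h : i < t.length then
    if st < t[i] then (t.drop i, v.drop i)
    else aStartLoop t v st (i + 1)
  else (t, v)
termination_by t.length - i

-- for i in range(len(mes_time)-1, 0, -1): if mes_time[i] < stop: slice both to i; break
-- (index argument counts down from len-1 to 1; index always in range, so getD is exact;
--  mes_time[:i] with i ≥ 0 is List.take i)
def aStopLoop (t v : List Int) (sp : Int) : Nat → List Int × List Int
  | 0 => (t, v)
  | i + 1 =>
    if t.getD (i + 1) 0 < sp then (t.take (i + 1), v.take (i + 1))
    else aStopLoop t v sp i

def mes_to_time_range (mes_time : List Int) (mes_value : List Int) (start : Option Int) (stop : Option Int) : List Int × List Int :=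
  let (t1, v1) :=
    match start with
    | none => (mes_time, mes_value)
    | some st => aStartLoop mes_time mes_value st 0
  match stop with
  | none => (t1, v1)
  | some sp => aStopLoop t1 v1 sp (t1.length - 1)

-- ===== PORT B =====
-- for i, t in enumerate(mes_time): if t > start: s = i; break   (s = 0 if no break)
def bStartIdx (t : List Int) (st : Int) (i : Nat) : Nat :=
  if h : i < t.length then
    if st < t[i] then i else bStartIdx t st (i + 1)
  else 0
termination_by t.length - i

-- e = None; for i in range(s+1, len(mes_time)): if mes_time[i] < stop: e = i
-- (range(s+1, n) is List.range' (s+1) (n - (s+1)); index always in range, so getD is exact)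
-- return mes_time[s:e], mes_value[s:e]  (xs[s:None] = drop s; xs[s:k], both ≥ 0, = (take k).drop s)
def mes_to_time_range_alt (mes_time : List Int) (mes_value : List Int) (start : Option Int) (stop : Option Int) : List Int × List Int :=
  let s : Nat :=
    match start with
    | none => 0
    | some st => bStartIdx mes_time st 0
  let e : Option Nat :=
    match stop with
    | none => none
    | some sp =>
      List.foldl (fun e i => if mes_time.getD i 0 < sp then some i else e) none
        (List.range' (s + 1) (mes_time.length - (s + 1)))
  match e with
  | none => (mes_time.drop s, mes_value.drop s)
  | some k => ((mes_time.take k).drop s, (mes_value.take k).drop s)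

-- ===== PRECONDITION & SPEC =====
def Spec_mes_to_time_range (mes_time : List Int) (mes_value : List Int) (start : Option Int) (stop : Option Int) (out : List Int × List Int) : Prop := out = mes_to_time_range_alt mes_time mes_value start stop
instance (mes_time : List Int) (mes_value : List Int) (start : Option Int) (stop : Option Int) (out : List Int × List Int) : Decidable (Spec_mes_to_time_range mes_time mes_value start stop out) := by unfold Spec_mes_to_time_range; infer_instance

-- ===== CLAIM (what is proved, stated in full; the proofs are below) =====
def Claim_equal_mes_to_time_range : Prop := ∀ (mes_time : List Int) (mes_value : List Int) (start : Option Int) (stop : Option Int), Dom_mes_to_time_range mes_time mes_value start stop → Spec_mes_to_time_range mes_time mes_value start stop (mes_to_time_range mes_time mes_value start stop)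

-- ===== LEMMAS AND PROOFS =====

-- A's start loop, entered at index i, finds the first index ≥ i whose element exceeds st.
theorem aStartLoop_char (t v : List Int) (st : Int) (i : Nat) :
    aStartLoop t v st i =
      match (t.drop i).findIdx? (fun x => st < x) with
      | some j => (t.drop (i + j), v.drop (i + j))
      | none => (t, v) := by
  fun_induction aStartLoop t v st i with
  | case1 i h hp =>
    rw [List.drop_eq_getElem_cons h, List.findIdx?_cons]
    simp [hp]
  | case2 i h hp ih =>
    rw [List.drop_eq_getElem_cons h, List.findIdx?_cons]
    simp only [hp, decide_false, Bool.false_eq_true, if_false, ih]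
    cases hfi : (t.drop (i + 1)).findIdx? (fun x => st < x) with
    | none => simp
    | some j => simp [Nat.add_assoc, Nat.add_comm 1 j]
  | case3 i h =>
    rw [List.drop_eq_nil_of_le (by omega)]
    simp

-- B's start scan, entered at index i, is the same first index (0 when there is none).
theorem bStartIdx_char (t : List Int) (st : Int) (i : Nat) :
    bStartIdx t st i =
      match (t.drop i).findIdx? (fun x => st < x) with
      | some j => i + j
      | none => 0 := by
  fun_induction bStartIdx t st i with
  | case1 i h hp =>
    rw [List.drop_eq_getElem_cons h, List.findIdx?_cons]
    simp [hp]
  | case2 i h hp ih =>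
    rw [List.drop_eq_getElem_cons h, List.findIdx?_cons]
    simp only [hp, decide_false, Bool.false_eq_true, if_false, ih]
    cases hfi : (t.drop (i + 1)).findIdx? (fun x => st < x) with
    | none => simp
    | some j => simp [Nat.add_assoc, Nat.add_comm 1 j]
  | case3 i h =>
    rw [List.drop_eq_nil_of_le (by omega)]
    simp

-- A's stop loop equals a downward find? over [i, i-1, …, 0] (index 0 can never match).
theorem aStopLoop_char (t v : List Int) (sp : Int) (i : Nat) :
    aStopLoop t v sp i =
      match (List.range (i + 1)).reverse.find? (fun k => decide (0 < k) && decide (t.getD k 0 < sp)) with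
      | some j => (t.take j, v.take j)
      | none => (t, v) := by
  induction i with
  | zero => simp [aStopLoop, List.range_succ]
  | succ i ih =>
    rw [show List.range (i + 1 + 1) = List.range (i + 1) ++ [i + 1] from List.range_succ]
    rw [List.reverse_append, List.reverse_singleton, List.singleton_append, List.find?_cons]
    by_cases hc : t.getD (i + 1) 0 < sp
    · rw [List.getD_eq_getElem?_getD] at hc
      simp [aStopLoop, hc]
    · simp only [aStopLoop, hc, decide_false, Bool.and_false, if_false, ih]

-- B's loop keeps the LAST matching index: a left fold updating the accumulator on a
-- match is the first match of the reversed list.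
theorem foldl_lastmatch (p : Nat → Prop) [DecidablePred p] (l : List Nat) (a : Option Nat) :
    List.foldl (fun e i => if p i then some i else e) a l
      = (l.reverse.find? (fun i => decide (p i))).or a := by
  induction l generalizing a with
  | nil => simp
  | cons x l ih =>
    rw [List.foldl_cons, ih, List.reverse_cons, List.find?_append]
    cases hl : l.reverse.find? p with
    | some j => simp
    | none =>
      simp only [Option.none_or, List.find?_cons, List.find?_nil]
      by_cases hp : p x <;> simp [hp]

-- B's downward find? over range (s+m) with the `s < k` guard is the shift by s of the
-- downward find? over range m on the dropped list.
theorem find_shift (t : List Int) (sp : Int) (s m : Nat) :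
    (List.range (s + m)).reverse.find? (fun k => decide (s < k) && decide (t.getD k 0 < sp))
      = (((List.range m).reverse.find?
          (fun j => decide (0 < j) && decide ((t.drop s).getD j 0 < sp))).map (s + ·)) := by
  rw [List.range_add, List.reverse_append, List.find?_append, ← List.map_reverse,
    List.find?_map]
  have h2 : (List.range s).reverse.find? (fun k => decide (s < k) && decide (t.getD k 0 < sp)) = none := by
    apply List.find?_eq_none.mpr
    intro k hk
    simp only [List.mem_reverse, List.mem_range] at hk
    simp [Nat.not_lt_of_lt hk]
  rw [h2, Option.or_none]
  have hfun : ((fun k => decide (s < k) && decide (t.getD k 0 < sp)) ∘ fun x => s + x)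
      = (fun j => decide (0 < j) && decide ((t.drop s).getD j 0 < sp)) := by
    funext j
    simp only [Function.comp]
    congr 1
    · exact decide_eq_decide.mpr (by omega)
    · have hg : (t.drop s).getD j 0 = t.getD (s + j) 0 := by
        rw [List.getD_eq_getElem?_getD, List.getD_eq_getElem?_getD, List.getElem?_drop]
      rw [hg]
  rw [hfun]

-- The guarded downward search over all indices equals the unguarded one over range' (s+1).
theorem find_guard (t : List Int) (sp : Int) (s n : Nat) :
    (List.range n).reverse.find? (fun k => decide (s < k) && decide (t.getD k 0 < sp))
      = (List.range' (s + 1) (n - (s + 1))).reverse.find? (fun k => decide (t.getD k 0 < sp)) := by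
  by_cases h : s + 1 ≤ n
  · have key : List.range n = List.range (s + 1) ++ (List.range (n - (s + 1))).map (s + 1 + ·) := by
      rw [show n = (s + 1) + (n - (s + 1)) by omega, List.range_add]
      simp
    rw [key, List.reverse_append, List.find?_append, ← List.map_reverse, List.find?_map,
      List.range'_eq_map_range, ← List.map_reverse, List.find?_map]
    have h2 : (List.range (s + 1)).reverse.find?
        (fun k => decide (s < k) && decide (t.getD k 0 < sp)) = none := by
      apply List.find?_eq_none.mpr
      intro k hk
      simp only [List.mem_reverse, List.mem_range] at hk
      simp [show ¬ s < k by omega]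
    rw [h2, Option.or_none]
    have hfun : ((fun k => decide (s < k) && decide (t.getD k 0 < sp)) ∘ fun x => s + 1 + x)
        = ((fun k => decide (t.getD k 0 < sp)) ∘ fun x => s + 1 + x) := by
      funext j
      simp only [Function.comp]
      simp [show s < s + 1 + j by omega]
    rw [hfun]
  · have hn : n - (s + 1) = 0 := by omega
    rw [hn]
    simp only [List.range'_zero, List.reverse_nil, List.find?_nil]
    apply List.find?_eq_none.mpr
    intro k hk
    simp only [List.mem_reverse, List.mem_range] at hk
    simp [show ¬ s < k by omega]
  
-- The stop phase: A run on the dropped lists agrees with B's index computation on the originals.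
theorem stop_phase (t v : List Int) (stop : Option Int) (s : Nat) (hs : s ≤ t.length) :
    (match stop with
      | none => (t.drop s, v.drop s)
      | some sp => aStopLoop (t.drop s) (v.drop s) sp ((t.drop s).length - 1)) =
    (match (match stop with
            | none => (none : Option Nat)
            | some sp => (List.range t.length).reverse.find?
                (fun k => decide (s < k) && decide (t.getD k 0 < sp))) with
      | none => (t.drop s, v.drop s)
      | some k => ((t.take k).drop s, (v.take k).drop s)) := by
  cases stop with
  | none => rfl
  | some sp =>
    dsimp only
    have hL : (t.drop s).length = t.length - s := by simp
    have hn : t.length = s + (t.length - s) := by omega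
    rw [aStopLoop_char, hn, find_shift]
    rcases Nat.eq_zero_or_pos (t.length - s) with h0 | hpos
    · rw [h0]
      have hdrop : t.drop s = [] := List.drop_eq_nil_of_le (by omega)
      simp [hdrop]
    · rw [hL, Nat.sub_add_cancel hpos]
      cases hf : (List.range (t.length - s)).reverse.find?
          (fun j => decide (0 < j) && decide ((t.drop s).getD j 0 < sp)) with
      | none => simp
      | some j =>
        simp only [Option.map_some]
        rw [List.drop_take, List.drop_take, Nat.add_sub_cancel_left]

-- ===== VERDICT (by name: the statement is the Claim_ definition above) =====
theorem mes_to_time_range_spec : Claim_equal_mes_to_time_range := by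
  intro t v start stop _
  unfold Spec_mes_to_time_range mes_to_time_range mes_to_time_range_alt
  have hB : ∀ s : Nat, s ≤ t.length →
      (match (match stop with
              | none => (none : Option Nat)
              | some sp => List.foldl (fun e i => if t.getD i 0 < sp then some i else e) none
                  (List.range' (s + 1) (t.length - (s + 1)))) with
        | none => (t.drop s, v.drop s)
        | some k => ((t.take k).drop s, (v.take k).drop s)) =
      (match (match stop with
              | none => (none : Option Nat)
              | some sp => (List.range t.length).reverse.find?
                  (fun k => decide (s < k) && decide (t.getD k 0 < sp))) with
        | none => (t.drop s, v.drop s)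
        | some k => ((t.take k).drop s, (v.take k).drop s)) := by
    intro s _
    cases stop with
    | none => rfl
    | some sp =>
      dsimp only
      rw [foldl_lastmatch (fun i => t.getD i 0 < sp), Option.or_none, find_guard]
  cases start with
  | none =>
    dsimp only
    rw [hB 0 (Nat.zero_le _)]
    have h0 := stop_phase t v stop 0 (Nat.zero_le _)
    simpa using h0
  | some st =>
    dsimp only
    rw [aStartLoop_char, bStartIdx_char]
    simp only [List.drop_zero, Nat.zero_add]
    cases hF : t.findIdx? (fun x => st < x) with
    | none =>
      rw [hB 0 (Nat.zero_le _)]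
      have h0 := stop_phase t v stop 0 (Nat.zero_le _)
      simpa using h0
    | some j =>
      have hj : j < t.length := by
        rw [List.findIdx?_eq_some_iff_getElem] at hF
        exact hF.1
      rw [hB j (Nat.le_of_lt hj)]
      have hkey := stop_phase t v stop j (Nat.le_of_lt hj)
      simpa using hkey
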